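-- pv_equiv track=rewrite | github.com/RY-05/project_euler_problems_to_100th | problem_008.py | adj_prod
-- ===== SOURCE A (Python) =====
-- data = "73167176531330624919225119674426574742355349194934\
-- 96983520312774506326239578318016984801869478851843\
-- 85861560789112949495459501737958331952853208805511\
-- 12540698747158523863050715693290963295227443043557\
-- 66896648950445244523161731856403098711121722383113\
-- 62229893423380308135336276614282806444486645238749\
-- 30358907296290491560440772390713810515859307960866\
-- 70172427121883998797908792274921901699720888093776\
-- 65727333001053367881220235421809751254540594752243\
-- 52584907711670556013604839586446706324415722155397\
-- 53697817977846174064955149290862569321978468622482\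
-- 83972241375657056057490261407972968652414535100474\
-- 82166370484403199890008895243450658541227588666881\
-- 16427171479924442928230863465674813919123162824586\
-- 17866458359124566529476545682848912883142607690042\
-- 24219022671055626321111109370544217506941658960408\
-- 07198403850962455444362981230987879927244284909188\
-- 84580156166097919133875499200524063689912560717606\
-- 05886116467109405077541002256983155200055935729725\
-- 71636269561882670428252483600823257530420752963450"
--
-- def adj_prod(x):
--
--     # set of products
--     list1 = []
--
--     # 2D list of sets of x adjacent numbers
--     list2 = []
--
--     # shifting starting position of product calculation
--     for i in range(0, len(data) - x):
--         prod = 1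
--         # operation for product of x adjacent digits
--         for j in range(0, x):
--             prod *= int(data[i + j])
--
--         list1.append(prod)
--
--         # stores x adjacent digits
--         temp_list = []
--
--         # composing list of digits in product
--         for k in range(0, x):
--             temp_list.append(data[i + k])
--
--         list2.append(temp_list)
--
--     return list1, list2
-- ===== SOURCE B (Python) =====
-- data = "73167176531330624919225119674426574742355349194934\
-- 96983520312774506326239578318016984801869478851843\
-- 85861560789112949495459501737958331952853208805511\
-- 12540698747158523863050715693290963295227443043557\
-- 66896648950445244523161731856403098711121722383113\
-- 62229893423380308135336276614282806444486645238749\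
-- 30358907296290491560440772390713810515859307960866\
-- 70172427121883998797908792274921901699720888093776\
-- 65727333001053367881220235421809751254540594752243\
-- 52584907711670556013604839586446706324415722155397\
-- 53697817977846174064955149290862569321978468622482\
-- 83972241375657056057490261407972968652414535100474\
-- 82166370484403199890008895243450658541227588666881\
-- 16427171479924442928230863465674813919123162824586\
-- 17866458359124566529476545682848912883142607690042\
-- 24219022671055626321111109370544217506941658960408\
-- 07198403850962455444362981230987879927244284909188\
-- 84580156166097919133875499200524063689912560717606\
-- 05886116467109405077541002256983155200055935729725\
-- 71636269561882670428252483600823257530420752963450"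
--
--
-- def adj_prod(x):
--     # Sliding-window: maintain the product of the nonzero digits of the
--     # current window plus a count of its zero digits, updating both in O(1)
--     # per shift instead of recomputing each window's product from scratch.
--     n = len(data)
--     if x > n:
--         return [], []
--     digits = [int(c) for c in data]
--     prod = 1
--     zeros = 0
--     for j in range(x):
--         if digits[j] == 0:
--             zeros += 1
--         else:
--             prod *= digits[j]
--     list1 = []
--     for i in range(0, n - x):
--         list1.append(0 if zeros > 0 else prod)
--         in_d = digits[i + x]
--         out_d = digits[i]
--         if in_d == 0:
--             zeros += 1
--         else:
--             prod *= in_d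
--         if out_d == 0:
--             zeros -= 1
--         else:
--             prod //= out_d
--     list2 = [list(data[i:i + x]) for i in range(0, n - x)]
--     return list1, list2
-- ===== Notes on version B (the rewrite author's own statement) =====
-- stated objective: alternative
-- what changed: B replaces A's per-window recomputation of the digit product (an inner loop over all x digits for each window) by a constant-work-per-shift sliding window that maintains the product of the window's nonzero digits plus a count of its zero digits, and builds list2 from string slices instead of a char-by-char append loop.
import Mathlib
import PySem

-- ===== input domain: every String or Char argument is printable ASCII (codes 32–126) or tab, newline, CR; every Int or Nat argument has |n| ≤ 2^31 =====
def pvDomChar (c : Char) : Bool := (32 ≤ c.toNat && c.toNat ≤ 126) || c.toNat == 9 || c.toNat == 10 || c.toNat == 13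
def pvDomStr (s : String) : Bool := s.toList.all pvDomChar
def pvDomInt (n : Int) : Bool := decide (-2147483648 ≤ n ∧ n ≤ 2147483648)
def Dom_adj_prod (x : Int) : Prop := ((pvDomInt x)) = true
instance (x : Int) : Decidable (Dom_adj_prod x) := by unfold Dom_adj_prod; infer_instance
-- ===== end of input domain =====

-- B replaces A's per-window digit-product recomputation (an inner loop per window)
-- by a sliding window maintaining the product of the window's nonzero digits plus a
-- zero count; list2 is built from string slices instead of a char-by-char append loop.

def pvData : String := "7316717653133062491922511967442657474235534919493496983520312774506326239578318016984801869478851843858615607891129494954595017379583319528532088055111254069874715852386305071569329096329522744304355766896648950445244523161731856403098711121722383113622298934233803081353362766142828064444866452387493035890729629049156044077239071381051585930796086670172427121883998797908792274921901699720888093776657273330010533678812202354218097512545405947522435258490771167055601360483958644670632441572215539753697817977846174064955149290862569321978468622482839722413756570560574902614079729686524145351004748216637048440319989000889524345065854122758866688116427171479924442928230863465674813919123162824586178664583591245665294765456828489128831426076900422421902267105562632111110937054421750694165896040807198403850962455444362981230987879927244284909188845801561660979191338754992005240636899125607176060588611646710940507754100225698315520005593572972571636269561882670428252483600823257530420752963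450"

-- ===== PORT A =====
-- A's int(data[i+j]) and data[i+k]; the .getD defaults are never reached
-- (every index generated by A's loops is in range)
def pvIntAt (k : Int) : Int := (PySem.Int.ofChars? [(PySem.Str.pyGet? pvData k).getD ' ']).getD 0
def pvStrAt (k : Int) : String := String.ofList [(PySem.Str.pyGet? pvData k).getD ' ']

def adj_prod (x : Int) : List Int × List (List String) :=
  (PySem.List.pyRange 0 (PySem.Str.len pvData - x)).foldl
    (fun (st : List Int × List (List String)) (i : Int) =>
      (st.1 ++ [(PySem.List.pyRange 0 x).foldl (fun p j => p * pvIntAt (i + j)) 1],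
       st.2 ++ [(PySem.List.pyRange 0 x).foldl (fun (t : List String) (k : Int) => t ++ [pvStrAt (i + k)]) []]))
    ([], [])

-- ===== PORT B =====
-- B's digits = [int(c) for c in data]
def pvDigits : List Int := pvData.toList.map (fun c => (PySem.Int.ofChars? [c]).getD 0)

-- the body of B's sliding-window loop (digits = B's precomputed digit list)
def pvStep (digits : List Int) (x : Int) (st : Int × Int × List Int) (i : Int) : Int × Int × List Int :=
  let emitted : Int := if st.2.1 > 0 then 0 else st.1
  let ind := PySem.List.pyGetD digits (i + x) 0
  let outd := PySem.List.pyGetD digits i 0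
  let p1 := if ind = 0 then st.1 else st.1 * ind
  let z1 := if ind = 0 then st.2.1 + 1 else st.2.1
  let p2 := if outd = 0 then p1 else PySem.Int.floordiv p1 outd
  let z2 := if outd = 0 then z1 - 1 else z1
  (p2, z2, st.2.2 ++ [emitted])

def adj_prod_alt (x : Int) : List Int × List (List String) :=
  let n : Int := PySem.Str.len pvData
  if x > n then ([], [])
  else
    let init : Int × Int := (PySem.List.pyRange 0 x).foldl
      (fun (pz : Int × Int) (j : Int) =>
        if PySem.List.pyGetD pvDigits j 0 = 0 then (pz.1, pz.2 + 1)
        else (pz.1 * PySem.List.pyGetD pvDigits j 0, pz.2)) (1, 0)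
    let fin := (PySem.List.pyRange 0 (n - x)).foldl (pvStep pvDigits x) (init.1, init.2, [])
    let list2 := (PySem.List.pyRange 0 (n - x)).map
      (fun i => (PySem.Str.slice pvData (some i) (some (i + x))).toList.map (fun c => String.ofList [c]))
    (fin.2.2, list2)

-- ===== PRECONDITION & SPEC =====
-- Pre_ excludes negative window sizes, outside the task's natural domain: A still
-- returns there (an empty product and an empty digit list per degenerate window),
-- while B's sliding window naturally raises an IndexError.
def Pre_adj_prod (x : Int) : Prop := 0 <= x
instance (x : Int) : Decidable (Pre_adj_prod x) := by unfold Pre_adj_prod; infer_instance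
def pvWitness_adj_prod : Int := (4)

def Spec_adj_prod (x : Int) (out : List Int × List (List String)) : Prop := out = adj_prod_alt x
instance (x : Int) (out : List Int × List (List String)) : Decidable (Spec_adj_prod x out) := by unfold Spec_adj_prod; infer_instance

-- ===== CLAIM (what is proved, stated in full; the proofs are below) =====
def Claim_equal_adj_prod : Prop := ∀ (x : Int), Dom_adj_prod x → Pre_adj_prod x → Spec_adj_prod x (adj_prod x)

-- ===== LEMMAS AND PROOFS =====

-- product of the nonzero entries of a list (B's `prod` state), and the width-xn
-- window of ds starting at i (all lemmas are generic in the digit list ds: the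
-- 1000-digit literal never enters a proof term)
def gFp (l : List Int) : Int := (l.filter (fun a => a != 0)).prod
def gWin (ds : List Int) (i xn : Nat) : List Int := (List.range xn).map (fun j => ds.getD (i + j) 0)

theorem gProd_eq_fp (l : List Int) :
    l.prod = if 0 < l.count 0 then 0 else gFp l := by
  induction l with
  | nil => simp [gFp]
  | cons a t ih =>
    by_cases h : a = 0
    · subst h; simp
    · simp only [List.prod_cons, ih, List.count_cons, gFp, List.filter_cons]
      by_cases hz : 0 < t.count 0 <;> simp [h, hz, bne_iff_ne]

theorem gFp_append (l : List Int) (a : Int) :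
    gFp (l ++ [a]) = if a = 0 then gFp l else gFp l * a := by
  by_cases h : a = 0 <;> simp [gFp, List.filter_append, h]

theorem gFp_cons (a : Int) (l : List Int) :
    gFp (a :: l) = if a = 0 then gFp l else a * gFp l := by
  by_cases h : a = 0 <;> simp [gFp, h]

theorem map_range_shift (f : Nat → Int) (i xn : Nat) :
    f i :: (List.range xn).map (fun j => f (i + 1 + j))
      = (List.range xn).map (fun j => f (i + j)) ++ [f (i + xn)] := by
  induction xn generalizing i with
  | zero => simp
  | succ n ih =>
    rw [List.range_succ, List.map_append, List.map_append]
    have h1 : i + 1 + n = i + (n + 1) := by omega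
    rw [show (List.map (fun j => f (i + 1 + j)) [n]) = [f (i + (n + 1))] by simp [h1]]
    rw [← List.cons_append, ih]
    simp [List.range_succ]

theorem gWin_shift (ds : List Int) (i xn : Nat) :
    ds.getD i 0 :: gWin ds (i + 1) xn = gWin ds i xn ++ [ds.getD (i + xn) 0] :=
  map_range_shift (fun k => ds.getD k 0) i xn

theorem pvPairFold {α : Type} (f : α → Int) (g : α → List String) (l : List α)
    (a : List Int) (b : List (List String)) :
    l.foldl (fun (st : List Int × List (List String)) (i : α) =>
        (st.1 ++ [f i], st.2 ++ [g i])) (a, b) = (a ++ l.map f, b ++ l.map g) := by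
  induction l generalizing a b with
  | nil => simp
  | cons y t ih => simp [ih]

theorem pvIntAt_eq (k : Nat) : pvIntAt (k : Int) = pvDigits.getD k 0 := by
  unfold pvIntAt pvDigits
  rw [PySem.Str.pyGet?_natCast, List.getD_eq_getElem?_getD, List.getElem?_map]
  cases h : pvData.toList[k]? with
  | none => simp [h]; decide
  | some c => simp [h]

theorem gAprod (f : Nat → Int) (fI : Int → Int) (hf : ∀ k : Nat, fI (k : Int) = f k)
    (ai xn : Nat) :
    (PySem.List.pyRange 0 (xn : Int)).foldl (fun p j => p * fI ((ai : Int) + j)) 1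
      = ((List.range xn).map (fun j => f (ai + j))).prod := by
  induction xn with
  | zero => simp [PySem.List.pyRange_one_eq_nil]
  | succ n ih =>
    rw [show ((n + 1 : Nat) : Int) = (n : Int) + 1 by push_cast; ring,
        PySem.List.pyRange_one_succ_right (by positivity), List.foldl_append]
    simp only [List.foldl_cons, List.foldl_nil, ih]
    rw [show ((ai : Int) + (n : Int)) = ((ai + n : Nat) : Int) by push_cast; ring, hf]
    simp [List.range_succ]

theorem gAlist (s : String) (ai xn : Nat) (h : ai + xn ≤ s.toList.length) :
    (PySem.List.pyRange 0 (xn : Int)).foldl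
        (fun (t : List String) (k : Int) =>
          t ++ [String.ofList [(PySem.Str.pyGet? s ((ai : Int) + k)).getD ' ']]) []
      = (PySem.Str.slice s (some (ai : Int)) (some ((ai : Int) + (xn : Int)))).toList.map
          (fun c => String.ofList [c]) := by
  rw [PySem.List.foldl_append_singleton_eq_map, List.nil_append]
  simp only [PySem.Str.slice, String.toList_ofList, PySem.Chars.slice,
    PySem.List.slice_natCast_add]
  rw [PySem.List.pyRange_one, show ((xn : Int) - 0).toNat = xn by omega, List.map_map]
  refine List.ext_getElem ?_ ?_
  · rw [List.length_map, List.length_range, List.length_map, List.length_take,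
      List.length_drop]
    omega
  · intro t h1 h2
    rw [List.length_map, List.length_take, List.length_drop] at h2
    simp only [List.getElem_map, List.getElem_range, Function.comp_apply, List.getElem_take,
      List.getElem_drop]
    rw [show ((ai : Int) + (0 + (t : Int))) = ((ai + t : Nat) : Int) by push_cast; ring,
      PySem.Str.pyGet?_natCast]
    rw [List.getElem?_eq_getElem (by omega)]
    rfl

theorem gInit (ds : List Int) (xn : Nat) :
    (PySem.List.pyRange 0 (xn : Int)).foldl
      (fun (pz : Int × Int) (j : Int) =>
        if PySem.List.pyGetD ds j 0 = 0 then (pz.1, pz.2 + 1)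
        else (pz.1 * PySem.List.pyGetD ds j 0, pz.2)) (1, 0)
      = (gFp (gWin ds 0 xn), ((gWin ds 0 xn).count 0 : Int)) := by
  induction xn with
  | zero => simp [PySem.List.pyRange_one_eq_nil, gWin, gFp]
  | succ n ih =>
    rw [show ((n + 1 : Nat) : Int) = (n : Int) + 1 by push_cast; ring,
        PySem.List.pyRange_one_succ_right (by positivity), List.foldl_append]
    simp only [List.foldl_cons, List.foldl_nil, ih, PySem.List.pyGetD_natCast]
    have hw : gWin ds 0 (n + 1) = gWin ds 0 n ++ [ds.getD n 0] := by
      simp [gWin, List.range_succ]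
    rw [hw, gFp_append, List.count_append]
    by_cases h : ds[n]?.getD 0 = 0 <;> simp [h]

theorem pvStep_apply (ds : List Int) (xn ai : Nat) (acc : List Int) :
    pvStep ds (xn : Int)
        (gFp (gWin ds ai xn), ((gWin ds ai xn).count 0 : Int), acc) ((ai : Int))
      = (gFp (gWin ds (ai + 1) xn), ((gWin ds (ai + 1) xn).count 0 : Int),
         acc ++ [(gWin ds ai xn).prod]) := by
  have E := gWin_shift ds ai xn
  have hfp : (if ds.getD (ai + xn) 0 = 0 then gFp (gWin ds ai xn)
              else gFp (gWin ds ai xn) * ds.getD (ai + xn) 0)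
      = (if ds.getD ai 0 = 0 then gFp (gWin ds (ai + 1) xn)
         else ds.getD ai 0 * gFp (gWin ds (ai + 1) xn)) := by
    rw [← gFp_append, ← gFp_cons, E]
  have hc : ((gWin ds ai xn).count 0 + (if ds.getD (ai + xn) 0 = 0 then 1 else 0) : Int)
      = ((if ds.getD ai 0 = 0 then 1 else 0) + ((gWin ds (ai + 1) xn).count 0 : Int)) := by
    have h2 := congrArg (fun l => (List.count 0 l : Int)) E
    simp only [List.count_append, List.count_cons, List.count_nil] at h2
    by_cases ha : ds.getD ai 0 = 0 <;> by_cases hb : ds.getD (ai + xn) 0 = 0 <;>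
      simp [ha, hb] at h2 ⊢ <;> push_cast at h2 ⊢ <;> omega
  unfold pvStep
  rw [show ((ai : Int) + (xn : Int)) = ((ai + xn : Nat) : Int) by push_cast; ring]
  simp only [PySem.List.pyGetD_natCast, Prod.mk.injEq]
  refine ⟨?_, ?_, ?_⟩
  · by_cases h1 : ds.getD ai 0 = 0
    · rw [if_pos h1]; rw [if_pos h1] at hfp; exact hfp
    · rw [if_neg h1]; rw [if_neg h1] at hfp; rw [hfp]
      simp only [PySem.Int.floordiv]; exact Int.mul_fdiv_cancel_left _ h1
  · split_ifs at hc ⊢ <;> omega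
  · rw [gProd_eq_fp (gWin ds ai xn)]
    by_cases h : 0 < (gWin ds ai xn).count 0
    · rw [if_pos (by omega : ((gWin ds ai xn).count 0 : Int) > 0), if_pos h]
    · rw [if_neg (by omega : ¬ ((gWin ds ai xn).count 0 : Int) > 0), if_neg h]

theorem gSlide (ds : List Int) (xn : Nat) : ∀ (k ai : Nat) (acc : List Int),
    ((PySem.List.pyRange (ai : Int) ((ai : Int) + (k : Int))).foldl (pvStep ds (xn : Int))
        (gFp (gWin ds ai xn), ((gWin ds ai xn).count 0 : Int), acc)).2.2
      = acc ++ (List.range k).map (fun t => (gWin ds (ai + t) xn).prod) := by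
  intro k
  induction k with
  | zero =>
    intro ai acc
    rw [show ((ai : Int) + ((0 : Nat) : Int)) = (ai : Int) by push_cast; ring,
        PySem.List.pyRange_one_eq_nil le_rfl]
    simp
  | succ k ih =>
    intro ai acc
    rw [PySem.List.pyRange_one_cons (by push_cast; omega), List.foldl_cons, pvStep_apply,
        show ((ai : Int) + 1) = ((ai + 1 : Nat) : Int) by push_cast; ring,
        show ((ai : Int) + ((k + 1 : Nat) : Int)) = ((ai + 1 : Nat) : Int) + ((k : Nat) : Int) by push_cast; ring,
        ih]
    rw [List.range_succ_eq_map, List.map_cons, List.map_map, List.append_assoc]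
    simp only [Nat.add_zero, List.singleton_append]
    refine congrArg _ (congrArg _ (List.map_congr_left ?_))
    intro t _
    simp only [Function.comp]
    congr 2
    omega

-- ===== VERDICT (by name: the statement is the Claim_ definition above) =====
theorem adj_prod_spec : Claim_equal_adj_prod := by
  intro x _ hx
  unfold Pre_adj_prod at hx
  unfold Spec_adj_prod
  unfold adj_prod adj_prod_alt
  rw [PySem.Str.len_eq]
  dsimp only
  by_cases hbig : (pvData.toList.length : Int) < x
  · rw [if_pos hbig,
      PySem.List.pyRange_one_eq_nil
        (a := 0) (b := (pvData.toList.length : Int) - x) (by omega)]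
    rfl
  · rw [if_neg hbig]
    obtain ⟨xn, rfl⟩ : ∃ xn : Nat, x = (xn : Int) := ⟨x.toNat, (Int.toNat_of_nonneg hx).symm⟩
    rw [pvPairFold, gInit pvDigits xn]
    dsimp only
    have hs := gSlide pvDigits xn (pvData.toList.length - xn) 0 []
    rw [show (((0 : Nat) : Int) + ((pvData.toList.length - xn : Nat) : Int))
          = (pvData.toList.length : Int) - (xn : Int) by push_cast; omega] at hs
    rw [Nat.cast_zero] at hs
    rw [hs, List.nil_append, List.nil_append, List.nil_append]
    refine Prod.ext ?_ ?_
    · -- list1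
      dsimp only
      rw [PySem.List.pyRange_one 0 ((pvData.toList.length : Int) - (xn : Int)), List.map_map,
        show ((pvData.toList.length : Int) - (xn : Int) - 0).toNat = pvData.toList.length - xn
          by omega]
      refine List.map_congr_left ?_
      intro t _
      simp only [Function.comp_apply, zero_add]
      exact gAprod (fun k => pvDigits.getD k 0) pvIntAt pvIntAt_eq t xn
    · -- list2
      dsimp only
      refine List.map_congr_left ?_
      intro i hi
      rw [PySem.List.mem_pyRange_one] at hi
      simp only [pvStrAt]
      rw [show i = ((i.toNat : Nat) : Int) by omega]
      exact gAlist pvData i.toNat xn (by omega)
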